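-- pv_equiv track=rewrite | github.com/Hauptman-Woodward/Marco_Polo | src/polo/ui/windows/html_report_dialog.py | sort_image_dict_by_class
-- ===== SOURCE A (Python) =====
-- def sort_image_dict_by_class(image_list, classifier='human_class'):
--     # converts json generated list of image dicts to a list that
--     # is sorted by the classifiction. Set the classifier using the
--     # classifier variable. Should be an attribute of image that contains
--     # a classification
--     image_bins = {}
--     for image in image_list:
--         c = str(image[classifier])
--         if c not in image_bins:
--             image_bins[c] = [image]
--         else:
--             image_bins[c].append(image)
--
--     return [image_bins[b] for b in sorted(image_bins)]
-- ===== SOURCE B (Python) =====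
-- def sort_image_dict_by_class(image_list, classifier='human_class'):
--     # Sort once by class key (stable), then cut the sorted list into
--     # consecutive runs of equal key: each run is one class group.
--     ordered = sorted(image_list, key=lambda image: str(image[classifier]))
--     groups = []
--     i = 0
--     n = len(ordered)
--     while i < n:
--         j = i + 1
--         while j < n and str(ordered[j][classifier]) == str(ordered[i][classifier]):
--             j += 1
--         groups.append(ordered[i:j])
--         i = j
--     return groups
-- ===== Notes on version B (the rewrite author's own statement) =====
-- stated objective: alternative
-- what changed: Replaces A's dict-binning followed by a sort of the keys with a single stable sort of the images by class key followed by one linear pass that cuts the sorted list into consecutive equal-key runs.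
import Mathlib
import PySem

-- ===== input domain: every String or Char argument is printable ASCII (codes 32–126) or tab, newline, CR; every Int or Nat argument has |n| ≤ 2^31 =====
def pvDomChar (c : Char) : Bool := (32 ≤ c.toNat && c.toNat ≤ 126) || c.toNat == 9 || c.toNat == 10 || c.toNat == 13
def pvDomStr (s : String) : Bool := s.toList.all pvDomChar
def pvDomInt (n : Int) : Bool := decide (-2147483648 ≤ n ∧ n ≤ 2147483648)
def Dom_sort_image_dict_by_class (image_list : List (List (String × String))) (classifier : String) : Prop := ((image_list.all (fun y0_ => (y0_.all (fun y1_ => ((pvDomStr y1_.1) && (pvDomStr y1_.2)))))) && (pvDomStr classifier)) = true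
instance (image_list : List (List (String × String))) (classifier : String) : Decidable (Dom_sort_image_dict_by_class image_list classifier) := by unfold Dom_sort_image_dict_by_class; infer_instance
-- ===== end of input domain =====

-- B replaces A's dict-binning-then-key-sort with one stable sort by class key and a
-- linear cut of the sorted list into consecutive equal-key runs (alternative algorithm,
-- same return value on Pre_).


-- ===== PORT A =====
-- image[classifier]: dicts are association lists, lookup = first match; str() of a str
-- is that str (values are String by the type convention). Where the classifier key is
-- missing Python raises KeyError — excluded by Pre_ below; the `.getD ""` default
-- there is never part of the claim.
def pvClassOf (image : List (String × String)) (classifier : String) : String :=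
  (image.lookup classifier).getD ""

def sort_image_dict_by_class (image_list : List (List (String × String))) (classifier : String) : List (List (List (String × String))) :=
  let image_bins := image_list.foldl (fun image_bins image =>
      let c := pvClassOf image classifier
      if image_bins.contains c then
        image_bins.modify c [] (fun v => v ++ [image])   -- image_bins[c].append(image)
      else
        image_bins.insert c [image]) PySem.Dict.empty
  (PySem.List.sorted image_bins.keys (fun b => b) false).map (fun b => image_bins.getD b [])

-- ===== PORT B =====
-- Source B's run-cutting while-loop: each step takes the maximal run of images whose key
-- equals the current head's key as one group, then continues after the run.
def pvGroupRuns (k : List (String × String) → String) : List (List (String × String)) → List (List (List (String × String)))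
  | [] => []
  | x :: t =>
    (x :: t.takeWhile (fun y => k y == k x)) :: pvGroupRuns k (t.dropWhile (fun y => k y == k x))
termination_by ys => ys.length
decreasing_by
  simpa [Nat.lt_succ_iff] using (List.dropWhile_sublist (l := t) (p := fun y => k y == k x)).length_le

def sort_image_dict_by_class_alt (image_list : List (List (String × String))) (classifier : String) : List (List (List (String × String))) :=
  let ordered := PySem.List.sorted image_list (fun image => pvClassOf image classifier) false
  pvGroupRuns (fun image => pvClassOf image classifier) ordered

-- ===== PRECONDITION & SPEC =====
-- Pre_: every image carries the classifier key — exactly the inputs on which Python A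
-- returns (elsewhere A raises KeyError).
def Pre_sort_image_dict_by_class (image_list : List (List (String × String))) (classifier : String) : Prop :=
  ∀ image ∈ image_list, (image.lookup classifier).isSome
instance (image_list : List (List (String × String))) (classifier : String) : Decidable (Pre_sort_image_dict_by_class image_list classifier) := by unfold Pre_sort_image_dict_by_class; infer_instance
def pvWitness_sort_image_dict_by_class : (List (List (String × String))) × String :=
  ([[("human_class", "b"), ("id", "0")], [("human_class", "a"), ("id", "1")], [("human_class", "b"), ("id", "2")]], "human_class")

def Spec_sort_image_dict_by_class (image_list : List (List (String × String))) (classifier : String) (out : List (List (List (String × String)))) : Prop := out = sort_image_dict_by_class_alt image_list classifier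
instance (image_list : List (List (String × String))) (classifier : String) (out : List (List (List (String × String)))) : Decidable (Spec_sort_image_dict_by_class image_list classifier out) := by unfold Spec_sort_image_dict_by_class; infer_instance

-- ===== CLAIM (what is proved, stated in full; the proofs are below) =====
def Claim_equal_sort_image_dict_by_class : Prop := ∀ (image_list : List (List (String × String))) (classifier : String), Dom_sort_image_dict_by_class image_list classifier → Pre_sort_image_dict_by_class image_list classifier → Spec_sort_image_dict_by_class image_list classifier (sort_image_dict_by_class image_list classifier)

-- ===== LEMMAS AND PROOFS =====

-- insertBy with the key comparator preserves key-sortedness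
theorem pv_insertBy_pairwise {α : Type} (k : α → String) (x : α) (s : List α)
    (hs : s.Pairwise (fun a b => k a ≤ k b)) :
    (PySem.List.insertBy (fun a b => decide (k a < k b)) x s).Pairwise (fun a b => k a ≤ k b) := by
  induction s with
  | nil => simp [PySem.List.insertBy]
  | cons y ys ih =>
    rw [List.pairwise_cons] at hs
    obtain ⟨hy, hys⟩ := hs
    by_cases h : k x < k y
    · simp only [PySem.List.insertBy, h, decide_true, if_true]
      refine List.Pairwise.cons ?_ (List.Pairwise.cons hy hys)
      intro z hz
      rcases List.mem_cons.mp hz with rfl | hz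
      · exact le_of_lt h
      · exact le_trans (le_of_lt h) (hy z hz)
    · simp only [PySem.List.insertBy, h, decide_false]
      refine List.Pairwise.cons ?_ (ih hys)
      intro z hz
      rcases (PySem.List.mem_insertBy _ _ _ _).mp hz with rfl | hz
      · exact le_of_not_gt h
      · exact hy z hz

-- stability, one insertion: the inserted element lands after all earlier equal-key ones
theorem pv_filter_insertBy {α : Type} (k : α → String) (c : String) (x : α) (s : List α)
    (hs : s.Pairwise (fun a b => k a ≤ k b)) :
    (PySem.List.insertBy (fun a b => decide (k a < k b)) x s).filter (fun y => k y == c)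
      = if k x == c then s.filter (fun y => k y == c) ++ [x] else s.filter (fun y => k y == c) := by
  induction s with
  | nil => by_cases hx : k x == c <;> simp [PySem.List.insertBy, List.filter, hx]
  | cons y ys ih =>
    rw [List.pairwise_cons] at hs
    obtain ⟨hy, hys⟩ := hs
    by_cases h : k x < k y
    · simp only [PySem.List.insertBy, h, decide_true, if_true]
      by_cases hx : k x == c
      · have hc : k x = c := by simpa using hx
        have hnone : (y :: ys).filter (fun y => k y == c) = [] := by
          apply List.filter_eq_nil_iff.mpr
          intro z hz
          have hle : k y ≤ k z := by
            rcases List.mem_cons.mp hz with rfl | hz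
            · exact le_refl _
            · exact hy z hz
          have hlt : k x < k z := lt_of_lt_of_le h hle
          simp only [beq_iff_eq]
          intro hzc
          exact absurd (hzc.trans hc.symm) (ne_of_gt hlt)
        rw [List.filter_cons_of_pos (by simpa using hx)]
        simp [hx, hnone]
      · rw [List.filter_cons_of_neg (by simpa using hx)]
        simp [hx]
    · simp only [PySem.List.insertBy, h, decide_false]
      rw [if_neg (by simp)]
      by_cases hyc : k y == c
      · rw [List.filter_cons_of_pos (by simpa using hyc), ih hys,
            List.filter_cons_of_pos (by simpa using hyc)]
        by_cases hx : k x == c <;> simp [hx]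
      · rw [List.filter_cons_of_neg (by simpa using hyc), ih hys,
            List.filter_cons_of_neg (by simpa using hyc)]

-- stability of the whole insertion sort, foldl form
theorem pv_filter_foldl {α : Type} (k : α → String) (c : String) (xs : List α) :
    ∀ acc : List α, acc.Pairwise (fun a b => k a ≤ k b) →
      (xs.foldl (fun acc x => PySem.List.insertBy (fun a b => decide (k a < k b)) x acc) acc).filter (fun y => k y == c)
        = acc.filter (fun y => k y == c) ++ xs.filter (fun y => k y == c) := by
  induction xs with
  | nil => intro acc _; simp
  | cons x xs ih =>
    intro acc hacc
    rw [List.foldl_cons, ih _ (pv_insertBy_pairwise k x acc hacc), pv_filter_insertBy k c x acc hacc]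
    by_cases hx : k x == c
    · rw [List.filter_cons_of_pos (by simpa using hx)]
      simp [hx]
    · rw [List.filter_cons_of_neg (by simpa using hx)]
      simp [hx]

-- filtering one class commutes with the stable sort
theorem pv_filter_sorted {α : Type} (k : α → String) (c : String) (xs : List α) :
    (PySem.List.sorted xs k false).filter (fun y => k y == c) = xs.filter (fun y => k y == c) := by
  rw [PySem.List.sorted_eq_foldl_insertBy]
  simpa using pv_filter_foldl k c xs [] (List.Pairwise.nil)

-- dedup is a sublist of its input
theorem pv_dedup_sublist {α : Type} [BEq α] [LawfulBEq α] (l : List α) :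
    List.Sublist (PySem.List.dedup l) l := by
  have h : ∀ (l : List α) (s : List α), List.Sublist (PySem.Set.update s l) (s ++ l) := by
    intro l
    induction l with
    | nil => intro s; simp [PySem.Set.update]
    | cons x xs ih =>
      intro s
      rw [PySem.Set.update_cons]
      by_cases hc : PySem.Set.contains s x
      · have hadd : PySem.Set.add s x = s := by
          simp [PySem.Set.add]
          exact (PySem.Set.contains_iff _ _).mp hc
        rw [hadd]
        exact (ih s).trans (by simp)
      · have hadd : PySem.Set.add s x = s ++ [x] := by
          simp [PySem.Set.add]
          intro hmem
          exact absurd ((PySem.Set.contains_iff _ _).mpr hmem) hc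
        rw [hadd]
        simpa using ih (s ++ [x])
  simpa [PySem.List.dedup_eq_ofList, ← PySem.Set.update_nil_left] using h l []

-- dedup of "a, copies of a, then an a-free tail"
theorem pv_dedup_prefix {α : Type} [BEq α] [LawfulBEq α] (a : α) (l1 l2 : List α)
    (h1 : ∀ y ∈ l1, y = a) (h2 : a ∉ l2) :
    PySem.List.dedup (a :: l1 ++ l2) = a :: PySem.List.dedup l2 := by
  have hfold : PySem.Set.update [a] l1 = [a] := by
    induction l1 with
    | nil => simp [PySem.Set.update]
    | cons y ys ih =>
      have hy : y = a := h1 y (by simp)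
      rw [PySem.Set.update_cons]
      have hadd : PySem.Set.add [a] y = [a] := by
        simp [PySem.Set.add, hy, PySem.Set.contains]
      rw [hadd]
      exact ih (fun z hz => h1 z (by simp [hz]))
  have hsplit : PySem.List.dedup (a :: l1 ++ l2) = PySem.Set.update (PySem.Set.update [a] l1) l2 := by
    simp [PySem.List.dedup_eq_ofList, ← PySem.Set.update_nil_left, List.cons_append,
      PySem.Set.update_cons, PySem.Set.update_append]
  rw [hsplit, hfold, PySem.Set.update_eq_append_filter]
  have hfil : (PySem.Set.ofList l2).filter (fun y => !PySem.Set.contains [a] y) = PySem.Set.ofList l2 := by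
    apply List.filter_eq_self.mpr
    intro y hy
    have hmem : y ∈ l2 := (PySem.Set.mem_ofList (xs := l2) (y := y)).mp hy
    simp [PySem.Set.contains]
    rintro rfl
    exact h2 hmem
  rw [hfil]
  simp [PySem.List.dedup_eq_ofList]

-- keys strictly grow across a run boundary
theorem pv_key_lt_of_mem_dropWhile {α : Type} (k : α → String) (x : α) (t : List α)
    (ht : (x :: t).Pairwise (fun a b => k a ≤ k b)) :
    ∀ y ∈ t.dropWhile (fun y => k y == k x), k x < k y := by
  induction t with
  | nil => simp
  | cons z t' ih =>
    rw [List.pairwise_cons] at ht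
    obtain ⟨hx, ht'⟩ := ht
    by_cases hq : k z == k x
    · rw [List.dropWhile_cons_of_pos (by simpa using hq)]
      apply ih
      rw [List.pairwise_cons] at ht' ⊢
      exact ⟨fun y hy => hx y (by simp [hy]), ht'.2⟩
    · rw [List.dropWhile_cons_of_neg (by simpa using hq)]
      intro y hy
      have hxz : k x < k z := by
        have hle : k x ≤ k z := hx z (by simp)
        have hne : k z ≠ k x := by simpa using hq
        exact lt_of_le_of_ne hle (Ne.symm hne)
      rcases List.mem_cons.mp hy with rfl | hy
      · exact hxz
      · rw [List.pairwise_cons] at ht'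
        exact lt_of_lt_of_le hxz (ht'.1 y hy)

-- the master lemma: run-cutting a key-sorted list = one filter per distinct key
theorem pv_groupRuns_eq (k : List (String × String) → String) (ys : List (List (String × String)))
    (hs : ys.Pairwise (fun a b => k a ≤ k b)) :
    pvGroupRuns k ys = (PySem.List.dedup (ys.map k)).map (fun c => ys.filter (fun y => k y == c)) := by
  induction ys using pvGroupRuns.induct k with
  | case1 => simp [pvGroupRuns]
  | case2 x t ih =>
    set q : List (String × String) → Bool := fun y => k y == k x with hqdef
    have hdrop := pv_key_lt_of_mem_dropWhile k x t hs
    rw [List.pairwise_cons] at hs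
    obtain ⟨hx, ht⟩ := hs
    have hsplit : t = t.takeWhile q ++ t.dropWhile q := (List.takeWhile_append_dropWhile).symm
    have htake_keys : ∀ c ∈ (t.takeWhile q).map k, c = k x := by
      intro c hc
      obtain ⟨y, hy, rfl⟩ := List.mem_map.mp hc
      have := List.mem_takeWhile_imp hy
      simpa [hqdef] using this
    have hdrop_keys : k x ∉ (t.dropWhile q).map k := by
      intro hc
      obtain ⟨y, hy, hyk⟩ := List.mem_map.mp hc
      exact absurd hyk (ne_of_lt (hdrop y hy)).symm
    have hmap : (x :: t).map k = k x :: ((t.takeWhile q).map k) ++ ((t.dropWhile q).map k) := by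
      conv_lhs => rw [hsplit]
      rw [List.map_cons, List.map_append, List.cons_append]
    have hded : PySem.List.dedup ((x :: t).map k)
        = k x :: PySem.List.dedup ((t.dropWhile q).map k) := by
      rw [hmap]
      exact pv_dedup_prefix _ _ _ htake_keys hdrop_keys
    have hdp : (t.dropWhile q).Pairwise (fun a b => k a ≤ k b) :=
      ht.sublist (List.dropWhile_sublist _)
    have hfilt_head : (x :: t).filter (fun y => k y == k x) = x :: t.takeWhile q := by
      rw [List.filter_cons_of_pos (by simp)]
      congr 1
      conv_lhs => rw [hsplit]
      rw [List.filter_append]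
      have h1 : (t.takeWhile q).filter (fun y => k y == k x) = t.takeWhile q := by
        apply List.filter_eq_self.mpr
        intro y hy
        simpa [hqdef] using List.mem_takeWhile_imp hy
      have h2 : (t.dropWhile q).filter (fun y => k y == k x) = [] := by
        apply List.filter_eq_nil_iff.mpr
        intro y hy
        simpa using (ne_of_lt (hdrop y hy)).symm
      rw [h1, h2, List.append_nil]
    have hfilt_tail : ∀ c ∈ PySem.List.dedup ((t.dropWhile q).map k),
        (x :: t).filter (fun y => k y == c) = (t.dropWhile q).filter (fun y => k y == c) := by
      intro c hc
      have hcmem : c ∈ (t.dropWhile q).map k := (PySem.List.mem_dedup _ _).mp hc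
      obtain ⟨y0, hy0, rfl⟩ := List.mem_map.mp hcmem
      have hxc : k x < k y0 := hdrop y0 hy0
      rw [List.filter_cons_of_neg (by simpa using (ne_of_lt hxc))]
      conv_lhs => rw [hsplit]
      rw [List.filter_append]
      have h1 : (t.takeWhile q).filter (fun y => k y == k y0) = [] := by
        apply List.filter_eq_nil_iff.mpr
        intro z hz
        have hzx : k z = k x := by simpa [hqdef] using List.mem_takeWhile_imp hz
        simp [hzx]
        exact (ne_of_lt hxc)
      rw [h1, List.nil_append]
    rw [pvGroupRuns, hded, List.map_cons, hfilt_head, ih hdp]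
    congr 1
    exact (List.map_congr_left hfilt_tail).symm

-- the two ports agree (on every input — the KeyError default is computed identically)
theorem pv_main (image_list : List (List (String × String))) (classifier : String) :
    sort_image_dict_by_class image_list classifier = sort_image_dict_by_class_alt image_list classifier := by
  set k : List (String × String) → String := fun image => pvClassOf image classifier with hk
  have hstep : (fun (d : PySem.Dict String (List (List (String × String)))) image =>
        let c := pvClassOf image classifier
        if d.contains c then d.modify c [] (fun v => v ++ [image]) else d.insert c [image])
      = fun d image => d.modify (k image) [] (fun v => v ++ [image]) := by
    funext d image
    by_cases hc : d.contains (pvClassOf image classifier)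
    · simp [hc, hk]
    · simp only [hc, PySem.Dict.modify, hk]
      rw [PySem.Dict.getD_of_not_contains _ _ (by simpa using hc)]
      simp
  have hbins : image_list.foldl (fun d image =>
        let c := pvClassOf image classifier
        if d.contains c then d.modify c [] (fun v => v ++ [image]) else d.insert c [image]) PySem.Dict.empty
      = (image_list.map (fun im => (k im, im))).foldl
          (fun d p => d.modify p.1 [] (fun v => v ++ [p.2])) PySem.Dict.empty := by
    rw [hstep, List.foldl_map]
  set bins := (image_list.map (fun im => (k im, im))).foldl
      (fun d p => d.modify p.1 [] (fun v => v ++ [p.2])) PySem.Dict.empty with hbdef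
  have hgetD : ∀ c, bins.getD c [] = image_list.filter (fun y => k y == c) := by
    intro c
    rw [hbdef, PySem.Dict.getD_foldl_modify_append]
    simp only [PySem.Dict.getD_empty, List.nil_append, List.filter_map]
    rw [List.map_map]
    have hcomp : ((fun (x : String × List (String × String)) => x.2) ∘ fun im => (k im, im)) = id := rfl
    rw [hcomp, List.map_id]
    rfl
  have hkeys : bins.keys = PySem.List.dedup (image_list.map k) := by
    rw [hbdef, List.foldl_map]
    have := PySem.Dict.keys_foldl_modify_key image_list k ([] : List (List (String × String)))
      (fun _ image => fun v => v ++ [image]) PySem.Dict.empty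
    simp only [this, PySem.Dict.keys_empty, PySem.Set.update_nil_left, PySem.List.dedup_eq_ofList]
  set ss := PySem.List.sorted image_list k false with hss
  have hsortedkeys : PySem.List.sorted bins.keys (fun b => b) false = PySem.List.dedup (ss.map k) := by
    apply PySem.List.sorted_eq_of_perm_of_pairwise_lt
    · rw [hkeys]
      apply (List.perm_ext_iff_of_nodup (PySem.List.nodup_dedup _) (PySem.List.nodup_dedup _)).mpr
      intro a
      simp only [PySem.List.mem_dedup, List.mem_map]
      constructor
      · rintro ⟨y, hy, rfl⟩; exact ⟨y, (PySem.List.mem_sorted _ _ _ _).mp hy, rfl⟩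
      · rintro ⟨y, hy, rfl⟩; exact ⟨y, (PySem.List.mem_sorted _ _ _ _).mpr hy, rfl⟩
    · have hle : (ss.map k).Pairwise (fun a b => a ≤ b) := PySem.List.sorted_map_key_pairwise _ _
      have hsub := pv_dedup_sublist (ss.map k)
      have hle' := hle.sublist hsub
      have hne : (PySem.List.dedup (ss.map k)).Pairwise (fun a b => a ≠ b) :=
        PySem.List.nodup_dedup _
      exact (hle'.and hne).imp (fun ⟨h1, h2⟩ => lt_of_le_of_ne h1 h2)
  show (PySem.List.sorted ((image_list.foldl (fun d image =>
        let c := pvClassOf image classifier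
        if d.contains c then d.modify c [] (fun v => v ++ [image]) else d.insert c [image]) PySem.Dict.empty)).keys (fun b => b) false).map (fun b => (image_list.foldl (fun d image =>
        let c := pvClassOf image classifier
        if d.contains c then d.modify c [] (fun v => v ++ [image]) else d.insert c [image]) PySem.Dict.empty).getD b []) = _
  rw [hbins, hsortedkeys]
  show _ = pvGroupRuns k ss
  rw [pv_groupRuns_eq k ss (PySem.List.sorted_pairwise _ _)]
  apply List.map_congr_left
  intro c _
  rw [hgetD c, hss, pv_filter_sorted]

-- ===== VERDICT (by name: the statement is the Claim_ definition above) =====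
theorem sort_image_dict_by_class_spec : Claim_equal_sort_image_dict_by_class := by
  intro image_list classifier _ _
  exact pv_main image_list classifier
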